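-- pv_equiv track=rewrite | github.com/ankitkparashar/python | HackerRank/leaderboard.py | leaderboard
-- ===== SOURCE A (Python) =====
-- def leaderboard(ranked, player):
--     positions = []
--     ranking = {}
--     sortedScores = sorted(set(ranked), reverse=True)
--     for i in range(1, len(sortedScores) + 1):
--         ranking[i] = sortedScores[i - 1]
--
--     rankingReversed = list(reversed(list(ranking.keys())))
--
--     for score in player:
--         for k in rankingReversed:
--             if score < ranking[k]:
--                 positions.append(k + 1)
--             elif score == ranking[k]:
--                     positions.append(k)
--             else:
--                 if k == 1:
--                     positions.append(k)
--                 else: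
--                     continue
--             break
--     return positions
-- ===== SOURCE B (Python) =====
-- def leaderboard(ranked, player):
--     # dense rank: rank(s) = 1 + number of distinct leaderboard scores strictly above s,
--     # found by binary search over the ascending list of distinct scores
--     uniq = sorted(set(ranked))
--     n = len(uniq)
--     res = []
--     for s in player:
--         lo, hi = 0, n
--         while lo < hi:
--             mid = (lo + hi) // 2
--             if uniq[mid] <= s:
--                 lo = mid + 1
--             else:
--                 hi = mid
--         res.append(n - lo + 1)
--     return res
-- ===== Notes on version B (the rewrite author's own statement) =====
-- stated objective: faster
-- what changed: Replaces A's per-player linear scan over the dense-rank dictionary by a hand-written binary search (bisect_right) over the ascending list of distinct scores, so each query costs O(log S) instead of O(S).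
-- intended difference: When ranked is empty and player is non-empty, A's inner loop has nothing to iterate over and silently returns [] (dropping all players), while B returns rank 1 for every player score, which is the intended dense rank against an empty leaderboard. — e.g. on leaderboard([], [5]): A returns [], B returns [1]
import Mathlib
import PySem

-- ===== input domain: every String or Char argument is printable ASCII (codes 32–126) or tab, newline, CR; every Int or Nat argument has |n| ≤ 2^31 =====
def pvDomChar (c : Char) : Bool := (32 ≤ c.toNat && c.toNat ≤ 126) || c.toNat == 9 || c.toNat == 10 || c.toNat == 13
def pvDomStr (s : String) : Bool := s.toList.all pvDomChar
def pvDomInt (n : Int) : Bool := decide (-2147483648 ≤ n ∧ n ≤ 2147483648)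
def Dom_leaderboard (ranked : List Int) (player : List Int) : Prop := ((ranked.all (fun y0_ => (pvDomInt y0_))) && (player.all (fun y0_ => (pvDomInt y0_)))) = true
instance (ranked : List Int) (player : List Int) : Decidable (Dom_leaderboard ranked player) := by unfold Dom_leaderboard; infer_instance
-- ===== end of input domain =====

-- B replaces A's per-player linear scan of the rank dictionary by a binary search over
-- the ascending distinct scores (objective: faster); on the corner ranked = [] with
-- players present, A silently returns [] while B returns rank 1 for every player
-- (stated as the intended difference D_ below).


-- ===== PORT A =====
-- inner 'for k in rankingReversed' loop: returns the position appended at the first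
-- break, none if the loop runs out of keys (possible only for an empty key list)
def findPosA (ranking : PySem.Dict Int Int) (score : Int) : List Int → Option Int
  | [] => none
  | k :: rest =>
    if score < ranking.getD k 0 then some (k + 1)      -- ranking[k]: key always present
    else if score = ranking.getD k 0 then some k
    else if k = 1 then some k
    else findPosA ranking score rest

def leaderboard (ranked : List Int) (player : List Int) : List Int :=
  let sortedScores := PySem.List.sorted (PySem.Set.ofList ranked) (fun x => x) true
  let ranking : PySem.Dict Int Int :=
    (PySem.List.pyRange 1 ((sortedScores.length : Int) + 1)).foldl
      (fun d i => d.insert i (PySem.List.pyGetD sortedScores (i - 1) 0)) PySem.Dict.empty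
  let rankingReversed := ranking.keys.reverse
  player.foldl (fun positions score =>
    match findPosA ranking score rankingReversed with
    | some p => positions ++ [p]
    | none => positions) []

-- ===== PORT B =====
-- hand-written bisect_right loop of Source B (uniq[mid] is always in range: mid < hi ≤ n);
-- the fuel (hi - lo, which strictly decreases) only makes the while loop structural
def bsearchGo (uniq : List Int) (s : Int) : Nat → Nat → Nat → Nat
  | 0, lo, _ => lo
  | fuel + 1, lo, hi =>
    if lo < hi then
      let mid := (lo + hi) / 2
      if uniq.getD mid 0 ≤ s then bsearchGo uniq s fuel (mid + 1) hi
      else bsearchGo uniq s fuel lo mid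
    else lo

def bsearchB (uniq : List Int) (s : Int) (lo hi : Nat) : Nat :=
  bsearchGo uniq s (hi - lo) lo hi

def leaderboard_alt (ranked : List Int) (player : List Int) : List Int :=
  let uniq := PySem.List.sorted (PySem.Set.ofList ranked) (fun x => x)
  let n := uniq.length
  player.foldl (fun res s => res ++ [(n : Int) - (bsearchB uniq s 0 n : Int) + 1]) []

-- ===== PRECONDITION & SPEC =====
-- When ranked is empty and player is non-empty, A's inner loop has nothing to iterate
-- over and silently returns [] (dropping all players), while B returns rank 1 for every
-- player score, the intended dense rank against an empty leaderboard.
def D_leaderboard (ranked : List Int) (player : List Int) : Prop := ranked = [] ∧ player ≠ []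
instance (ranked : List Int) (player : List Int) : Decidable (D_leaderboard ranked player) := by unfold D_leaderboard; infer_instance
def Spec_leaderboard (ranked : List Int) (player : List Int) (out : List Int) : Prop := ¬ D_leaderboard ranked player → out = leaderboard_alt ranked player
instance (ranked : List Int) (player : List Int) (out : List Int) : Decidable (Spec_leaderboard ranked player out) := by unfold Spec_leaderboard; infer_instance
def pvDiffWitness_leaderboard : List Int × List Int := ([], [5])
def pvDiffWitnessOut_leaderboard : (List Int) × (List Int) := ([], [1])

-- ===== CLAIM (what is proved, stated in full; the proofs are below) =====
def Claim_unchanged_leaderboard : Prop := ∀ (ranked : List Int) (player : List Int), Dom_leaderboard ranked player → Spec_leaderboard ranked player (leaderboard ranked player)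
def Claim_changed_leaderboard : Prop := Dom_leaderboard (pvDiffWitness_leaderboard.1) (pvDiffWitness_leaderboard.2) ∧ D_leaderboard (pvDiffWitness_leaderboard.1) (pvDiffWitness_leaderboard.2) ∧ leaderboard (pvDiffWitness_leaderboard.1) (pvDiffWitness_leaderboard.2) = pvDiffWitnessOut_leaderboard.1 ∧ leaderboard_alt (pvDiffWitness_leaderboard.1) (pvDiffWitness_leaderboard.2) = pvDiffWitnessOut_leaderboard.2 ∧ pvDiffWitnessOut_leaderboard.1 ≠ pvDiffWitnessOut_leaderboard.2
def Claim_exact_leaderboard : Prop := ∀ (ranked : List Int) (player : List Int), Dom_leaderboard ranked player → D_leaderboard ranked player → leaderboard ranked player ≠ leaderboard_alt ranked player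

-- ===== LEMMAS AND PROOFS =====

-- the common per-score value: 1 + number of distinct scores strictly above s,
-- written n - |{x ∈ u : x ≤ s}| + 1 over the ascending distinct-score list u
def rankVal (u : List Int) (s : Int) : Int :=
  (u.length : Int) - (u.countP (fun x => decide (x ≤ s)) : Int) + 1

-- on a sorted list, the elements ≤ s are exactly a prefix of length countP
theorem countP_le_prefix (u : List Int) (s : Int)
    (hs : u.Pairwise (fun a b => a ≤ b)) (i : Nat) (hi : i < u.length) :
    (u[i] ≤ s ↔ i < u.countP (fun x => decide (x ≤ s))) := by
  induction u generalizing i with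
  | nil => simp at hi
  | cons x rest ih =>
    rcases List.pairwise_cons.mp hs with ⟨hx, hrest⟩
    by_cases hxs : x ≤ s
    · have hc : (x :: rest).countP (fun x => decide (x ≤ s))
          = rest.countP (fun x => decide (x ≤ s)) + 1 := by
        simp [hxs]
      cases i with
      | zero => simpa [hc] using hxs
      | succ j =>
        have hj : j < rest.length := by simpa using hi
        simpa [hc, Nat.succ_lt_succ_iff] using ih hrest j hj
    · have hzero : rest.countP (fun x => decide (x ≤ s)) = 0 := by
        rw [List.countP_eq_zero]
        intro y hy
        simp only [decide_eq_true_eq]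
        intro hys
        exact hxs (le_trans (hx y hy) hys)
      have hc : (x :: rest).countP (fun x => decide (x ≤ s)) = 0 := by
        simp [hxs, hzero]
      rw [hc]
      simp only [Nat.not_lt_zero, iff_false]
      cases i with
      | zero => simpa using hxs
      | succ j =>
        have hj : j < rest.length := by simpa using hi
        intro hle
        exact hxs (le_trans (hx _ (List.getElem_mem hj)) (by simpa using hle))

-- B's while loop homes in on that prefix length
theorem bsearchGo_eq (u : List Int) (s : Int)
    (hs : u.Pairwise (fun a b => a ≤ b)) :
    ∀ fuel lo hi, hi - lo ≤ fuel → lo ≤ u.countP (fun x => decide (x ≤ s)) →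
      u.countP (fun x => decide (x ≤ s)) ≤ hi → hi ≤ u.length →
      bsearchGo u s fuel lo hi = u.countP (fun x => decide (x ≤ s)) := by
  intro fuel
  induction fuel with
  | zero => intro lo hi hf h1 h2 h3; simp only [bsearchGo]; omega
  | succ fuel ih =>
    intro lo hi hf h1 h2 h3
    simp only [bsearchGo]
    split_ifs with hlh hms
    · have hmid : (lo + hi) / 2 < u.length := by omega
      have := (countP_le_prefix u s hs _ hmid).mp (by
        rwa [List.getD_eq_getElem u 0 hmid] at hms)
      exact ih _ hi (by omega) (by omega) h2 h3
    · have hmid : (lo + hi) / 2 < u.length := by omega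
      have hnot : ¬ ((lo + hi) / 2 < u.countP (fun x => decide (x ≤ s))) := by
        intro hc
        exact hms (by rw [List.getD_eq_getElem u 0 hmid]
                      exact (countP_le_prefix u s hs _ hmid).mpr hc)
      exact ih lo _ (by omega) h1 (by omega) (by omega)
    · omega

-- the value A's inner scan yields, expressed directly on the ascending list
def gScan (s : Int) : List Int → Option Int
  | [] => none
  | x :: rest =>
    if s < x then some ((rest.length : Int) + 2)
    else if s = x then some ((rest.length : Int) + 1)
    else if rest = [] then some 1
    else gScan s rest

theorem gScan_eq_rankVal (s : Int) : ∀ u : List Int, u ≠ [] →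
    u.Pairwise (fun a b => a < b) → gScan s u = some (rankVal u s) := by
  intro u
  induction u with
  | nil => intro h; exact absurd rfl h
  | cons x rest ih =>
    intro _ hp
    rcases List.pairwise_cons.mp hp with ⟨hx, hrest⟩
    simp only [gScan]
    by_cases h1 : s < x
    · have hc : (x :: rest).countP (fun y => decide (y ≤ s)) = 0 := by
        rw [List.countP_eq_zero]
        intro y hy
        simp only [decide_eq_true_eq, not_le]
        rcases List.mem_cons.mp hy with h | h
        · omega
        · exact lt_trans h1 (hx y h)
      simp only [if_pos h1, rankVal, hc]
      simp
      omega
    · by_cases h2 : s = x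
      · have hc : (x :: rest).countP (fun y => decide (y ≤ s)) = 1 := by
          have hr : rest.countP (fun y => decide (y ≤ s)) = 0 := by
            rw [List.countP_eq_zero]
            intro y hy
            simp only [decide_eq_true_eq, not_le]
            rw [h2]; exact hx y hy
          simp [hr, h2.symm.le]
        simp only [if_neg h1, if_pos h2, rankVal, hc]
        simp
      · have hxs : x ≤ s := by omega
        by_cases h3 : rest = []
        · subst h3
          simp only [if_neg h1, if_neg h2, rankVal]
          simp [hxs]
        · rw [if_neg h1, if_neg h2, if_neg h3, ih h3 hrest]
          have hcle := List.countP_le_length (l := rest) (p := fun y => decide (y ≤ s))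
          simp only [rankVal, List.countP_cons, List.length_cons, hxs, decide_true]
          congr 1
          push_cast
          omega

-- the dictionary built by A's first loop, looked up / its key list
theorem foldl_insert_getD (ks : List Int) (f : Int → Int) (d0 : PySem.Dict Int Int) (k : Int) :
    ((ks.foldl (fun d i => d.insert i (f i)) d0).getD k 0)
      = if k ∈ ks then f k else d0.getD k 0 := by
  induction ks generalizing d0 with
  | nil => simp
  | cons i rest ih =>
    simp only [List.foldl_cons, ih, List.mem_cons]
    by_cases hk : k ∈ rest
    · simp [hk]
    · rw [if_neg hk, PySem.Dict.getD_insert]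
      by_cases he : k = i
      · simp [he]
      · simp [he, hk]

theorem foldl_insert_keys (ks : List Int) (f : Int → Int) (d0 : PySem.Dict Int Int)
    (hnd : ks.Nodup) (hd : ∀ k ∈ ks, d0.contains k = false) :
    (ks.foldl (fun d i => d.insert i (f i)) d0).keys = d0.keys ++ ks := by
  induction ks generalizing d0 with
  | nil => simp
  | cons i rest ih =>
    simp only [List.foldl_cons]
    rw [ih _ (List.nodup_cons.mp hnd).2]
    · rw [PySem.Dict.keys_insert_of_not_contains d0 (f i) (hd i (List.mem_cons_self))]
      simp
    · intro k hk
      rw [PySem.Dict.contains_insert]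
      have : k ≠ i := fun h => (List.nodup_cons.mp hnd).1 (h ▸ hk)
      simp [this, hd k (List.mem_cons_of_mem _ hk)]

-- A's inner scan over keys [j, ..., 1] is gScan on the length-j suffix of u
theorem findPosA_eq_gScan (u : List Int) (s : Int)
    (ranking : PySem.Dict Int Int)
    (hget : ∀ k : Int, 1 ≤ k → k ≤ (u.length : Int) →
      ranking.getD k 0 = PySem.List.pyGetD u.reverse (k - 1) 0) :
    ∀ j : Nat, j ≤ u.length →
      findPosA ranking s (PySem.List.pyRange 1 ((j : Int) + 1)).reverse
        = gScan s (u.drop (u.length - j)) := by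
  intro j
  induction j with
  | zero =>
    intro _
    simp [findPosA, gScan]
  | succ j ih =>
    intro hj
    have hjlt : j < u.length := hj
    have hrange : (PySem.List.pyRange 1 (((j + 1 : Nat) : Int) + 1)).reverse
        = ((j : Int) + 1) :: (PySem.List.pyRange 1 ((j : Int) + 1)).reverse := by
      push_cast
      rw [PySem.List.pyRange_one_succ_right (by omega)]
      simp
    have hidx : u.length - 1 - j < u.length := by omega
    have hgetk : ranking.getD ((j : Int) + 1) 0 = u[u.length - 1 - j] := by
      rw [hget ((j:Int)+1) (by omega) (by omega)]
      have : ((j : Int) + 1 - 1) = ((j : Nat) : Int) := by omega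
      rw [this, PySem.List.pyGetD_natCast]
      rw [List.getD_eq_getElem _ 0 (by simpa using hjlt)]
      simp [List.getElem_reverse]
    have hdrop : u.drop (u.length - (j + 1))
        = u[u.length - 1 - j] :: u.drop (u.length - j) := by
      have h1 : u.length - (j+1) < u.length := by omega
      rw [List.drop_eq_getElem_cons h1]
      congr 2 <;> omega
    have hlenrest : (u.drop (u.length - j)).length = j := by
      simp; omega
    rw [hrange, hdrop]
    simp only [findPosA, gScan, hgetk, hlenrest]
    by_cases h1 : s < u[u.length - 1 - j]
    · simp [h1]; ring
    · by_cases h2 : s = u[u.length - 1 - j]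
      · simp [h2]
      · by_cases h3 : j = 0
        · subst h3
          simp
        · have hne : ((j : Int) + 1) ≠ 1 := by omega
          have hne2 : u.drop (u.length - j) ≠ [] := by
            intro h
            have := congrArg List.length h
            simp [hlenrest] at this
            omega
          rw [if_neg h1, if_neg h2, if_neg hne, if_neg h1, if_neg h2, if_neg hne2]
          exact ih (by omega)

-- both programs compute player.map (rankVal u)
theorem leaderboard_eq_map (ranked player : List Int) (h : ranked ≠ []) :
    leaderboard ranked player
      = player.map (rankVal (PySem.List.sorted (PySem.Set.ofList ranked) (fun x => x))) := by
  unfold leaderboard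
  set u := PySem.List.sorted (PySem.Set.ofList ranked) (fun x => x) with hu
  set d := PySem.List.sorted (PySem.Set.ofList ranked) (fun x => x) true with hd
  have hpw : u.Pairwise (fun a b => a < b) := PySem.List.sorted_ofList_pairwise_lt ranked
  have hdu : d = u.reverse := by
    rw [hd]
    apply PySem.List.sorted_rev_eq_of_perm_of_pairwise_gt
    · exact (List.reverse_perm u).trans (PySem.List.sorted_perm _ _ _)
    · exact List.pairwise_reverse.mpr hpw
  have hlen : d.length = u.length := by rw [hdu, List.length_reverse]
  have hne : u ≠ [] := by
    intro h0
    have hset : PySem.Set.ofList ranked = [] := by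
      rwa [hu, PySem.List.sorted_eq_nil_iff] at h0
    cases ranked with
    | nil => exact h rfl
    | cons a t =>
      have : a ∈ PySem.Set.ofList (a :: t) := (PySem.Set.mem_ofList _ a).mpr List.mem_cons_self
      rw [hset] at this
      exact absurd this (List.not_mem_nil)
  set ranking : PySem.Dict Int Int :=
    (PySem.List.pyRange 1 ((d.length : Int) + 1)).foldl
      (fun dd i => dd.insert i (PySem.List.pyGetD d (i - 1) 0)) PySem.Dict.empty with hr
  have hget : ∀ k : Int, 1 ≤ k → k ≤ (u.length : Int) →
      ranking.getD k 0 = PySem.List.pyGetD u.reverse (k - 1) 0 := by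
    intro k h1 h2
    rw [hr, foldl_insert_getD, if_pos, ← hdu]
    rw [PySem.List.mem_pyRange_one]
    omega
  have hkeys : ranking.keys = PySem.List.pyRange 1 ((d.length : Int) + 1) := by
    rw [hr, foldl_insert_keys _ _ _ (PySem.List.nodup_pyRange_one _ _)
      (fun k _ => PySem.Dict.contains_empty k)]
    simp [PySem.Dict.keys_empty]
  have hscan : ∀ s, findPosA ranking s ranking.keys.reverse = some (rankVal u s) := by
    intro s
    rw [hkeys, hlen]
    have := findPosA_eq_gScan u s ranking hget u.length (le_refl _)
    simp only [Nat.sub_self, List.drop_zero] at this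
    rw [this, gScan_eq_rankVal s u hne hpw]
  calc player.foldl (fun positions score =>
        match findPosA ranking score ranking.keys.reverse with
        | some p => positions ++ [p]
        | none => positions) []
      = player.foldl (fun positions score => positions ++ [rankVal u score]) [] := by
        apply PySem.List.foldl_congr_mem
        intro acc x _
        rw [hscan x]
    _ = player.map (rankVal u) := by
        rw [PySem.List.foldl_append_singleton_eq_map]
        simp

theorem leaderboard_alt_eq_map (ranked player : List Int) :
    leaderboard_alt ranked player
      = player.map (rankVal (PySem.List.sorted (PySem.Set.ofList ranked) (fun x => x))) := by
  unfold leaderboard_alt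
  set u := PySem.List.sorted (PySem.Set.ofList ranked) (fun x => x) with hu
  have hpw : u.Pairwise (fun a b => a ≤ b) :=
    (PySem.List.sorted_ofList_pairwise_lt ranked).imp (fun h => le_of_lt h)
  have hb : ∀ s, bsearchB u s 0 u.length = u.countP (fun x => decide (x ≤ s)) := by
    intro s
    unfold bsearchB
    exact bsearchGo_eq u s hpw _ 0 u.length (by omega) (Nat.zero_le _)
      (List.countP_le_length) (le_refl _)
  calc player.foldl (fun res s => res ++ [(u.length : Int) - (bsearchB u s 0 u.length : Int) + 1]) []
      = player.foldl (fun res s => res ++ [rankVal u s]) [] := by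
        apply PySem.List.foldl_congr_mem
        intro acc x _
        rw [hb x]
        rfl
    _ = player.map (rankVal u) := by
        rw [PySem.List.foldl_append_singleton_eq_map]
        simp

-- ===== VERDICT (by name: the statement is the Claim_ definition above) =====
theorem leaderboard_spec : Claim_unchanged_leaderboard := by
  intro ranked player _ hD
  by_cases h : ranked = []
  · have hp : player = [] := by
      by_contra hp
      exact hD ⟨h, hp⟩
    subst hp
    simp [leaderboard, leaderboard_alt]
  · rw [leaderboard_eq_map ranked player h, leaderboard_alt_eq_map]

theorem leaderboard_changed : Claim_changed_leaderboard := by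
  unfold Claim_changed_leaderboard; decide

theorem leaderboard_tight : Claim_exact_leaderboard := by
  intro ranked player _ hD
  rcases hD with ⟨hr, hp⟩
  subst hr
  have hA : leaderboard [] player = [] := by
    unfold leaderboard
    exact PySem.List.foldl_ignore player []
  have hB : (leaderboard_alt [] player).length = player.length := by
    rw [leaderboard_alt_eq_map]
    simp
  intro hcontra
  rw [hA] at hcontra
  have := congrArg List.length hcontra
  rw [hB] at this
  simp at this
  exact hp (List.eq_nil_of_length_eq_zero this.symm)
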